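-- pv_equiv track=rewrite | github.com/alex-yung-github/AI | tetrispt2.py | getColHeights
-- ===== SOURCE A (Python) =====
-- def getColHeights(board):
--     cH = []
--     for w in range(10):
--         tempcH = 0
--         for h in range(20):
--             index = w + (h*10)
--             if(board[index:index+1] == "#"):
--                 tempcH = 20-h
--                 break
--         cH.append(tempcH)
--     return cH
-- ===== SOURCE B (Python) =====
-- def getColHeights(board):
--     cH = [0] * 10
--     for i in range(200):
--         if board[i:i+1] == "#":
--             w = i % 10
--             cH[w] = max(cH[w], 20 - i // 10)
--     return cH
-- ===== Notes on version B (the rewrite author's own statement) =====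
-- stated objective: simpler
-- what changed: Replaced the nested per-column scan with early break by one flat pass over indices 0..199 keeping a running maximum of 20 - i//10 per column i%10.
import Mathlib
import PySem

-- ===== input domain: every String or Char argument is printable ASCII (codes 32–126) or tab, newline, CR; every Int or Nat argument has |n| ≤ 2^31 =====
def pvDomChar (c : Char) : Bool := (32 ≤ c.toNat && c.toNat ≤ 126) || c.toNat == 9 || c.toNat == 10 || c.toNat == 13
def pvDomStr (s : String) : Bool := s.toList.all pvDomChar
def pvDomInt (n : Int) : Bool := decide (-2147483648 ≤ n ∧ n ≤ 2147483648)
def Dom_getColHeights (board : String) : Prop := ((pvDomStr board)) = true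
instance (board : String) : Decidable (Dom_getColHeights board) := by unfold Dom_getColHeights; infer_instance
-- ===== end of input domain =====

-- B is a single flat pass with a running per-column maximum instead of A's nested
-- per-column scan with an early break (objective: simpler).

-- shared primitive: the Python slice test  board[i:i+1] == "#"  (exact via PySem slice)
def pvFilled (l : List Char) (i : Nat) : Bool :=
  PySem.List.slice l (some (i : Int)) (some ((i : Int) + 1)) == ['#']

-- ===== PORT A =====
-- inner loop of A: for h in range(20): if board[w+h*10 : …] == "#": return 20-h (break); else 0
def pvColA (l : List Char) (w : Nat) (h : Nat) : Int :=
  if h < 20 then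
    if pvFilled l (w + h * 10) then (20 : Int) - (h : Int)
    else pvColA l w (h + 1)
  else 0
termination_by 20 - h

def getColHeights (board : String) : List Int :=
  (List.range 10).map (fun w => pvColA board.toList w 0)

-- ===== PORT B =====
def pvStepB (l : List Char) (cH : List Int) (i : Nat) : List Int :=
  if pvFilled l i then
    cH.set (i % 10) (max (cH.getD (i % 10) 0) ((20 : Int) - ((i / 10 : Nat) : Int)))
  else cH

def getColHeights_alt (board : String) : List Int :=
  (List.range 200).foldl (pvStepB board.toList) (List.replicate 10 0)

-- ===== PRECONDITION & SPEC =====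
def Spec_getColHeights (board : String) (out : List Int) : Prop := out = getColHeights_alt board
instance (board : String) (out : List Int) : Decidable (Spec_getColHeights board out) := by unfold Spec_getColHeights; infer_instance

-- ===== CLAIM (what is proved, stated in full; the proofs are below) =====
def Claim_equal_getColHeights : Prop := ∀ (board : String), Dom_getColHeights board → Spec_getColHeights board (getColHeights board)

-- ===== LEMMAS AND PROOFS =====

-- per-column accumulator of B restricted to one column
def pvColStep (l : List Char) (a : Int) (i : Nat) : Int :=
  if pvFilled l i then max a ((20 : Int) - ((i / 10 : Nat) : Int)) else a

theorem pvStepB_length (l : List Char) (cH : List Int) (i : Nat) :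
    (pvStepB l cH i).length = cH.length := by
  unfold pvStepB; split <;> simp

theorem pvFoldB_length (l : List Char) (L : List Nat) (cH : List Int) :
    (L.foldl (pvStepB l) cH).length = cH.length := by
  induction L generalizing cH with
  | nil => rfl
  | cons i L ih => simpa [List.foldl, pvStepB_length] using ih (pvStepB l cH i)

-- independence of columns: the fold's entry at w only sees the indices with i % 10 = w
theorem pvFoldB_getD (l : List Char) (L : List Nat) (cH : List Int) (w : Nat)
    (hw : w < cH.length) :
    (L.foldl (pvStepB l) cH).getD w 0
      = (L.filter (fun i => i % 10 == w)).foldl (pvColStep l) (cH.getD w 0) := by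
  induction L generalizing cH with
  | nil => rfl
  | cons i L ih =>
    have hlen : (pvStepB l cH i).length = cH.length := pvStepB_length l cH i
    have hrec := ih (pvStepB l cH i) (by omega)
    by_cases hiw : i % 10 = w
    · have : (pvStepB l cH i).getD w 0 = pvColStep l (cH.getD w 0) i := by
        unfold pvStepB pvColStep
        split
        · subst hiw
          simp [List.getD, List.getElem?_set_self (by omega : i % 10 < cH.length)]
        · rfl
      rw [List.foldl_cons, hrec, this,
        List.filter_cons_of_pos (by simpa using hiw), List.foldl_cons]
    · have : (pvStepB l cH i).getD w 0 = cH.getD w 0 := by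
        unfold pvStepB
        split
        · simp [List.getD, List.getElem?_set_ne (by omega : i % 10 ≠ w)]
        · rfl
      rw [List.foldl_cons, hrec, this,
        List.filter_cons_of_neg (by simpa using hiw)]

-- for each column w < 10, the indices of column w among 0..199, in row order
theorem pvFilter_range (w : Nat) (hw : w < 10) :
    (List.range 200).filter (fun i => i % 10 == w)
      = (List.range 20).map (fun h => w + h * 10) := by
  interval_cases w <;> decide

theorem pvColA_nonneg (l : List Char) (w h : Nat) : 0 ≤ pvColA l w h := by
  unfold pvColA
  split
  · split
    · omega
    · exact pvColA_nonneg l w (h + 1)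
  · omega
termination_by 20 - h

theorem pvColA_le (l : List Char) (w h : Nat) (hh : h ≤ 20) :
    pvColA l w h ≤ (20 : Int) - (h : Int) := by
  unfold pvColA
  split
  · split
    · omega
    · have := pvColA_le l w (h + 1) (by omega)
      omega
  · omega
termination_by 20 - h

-- running max over the tail of a column = A's first-hit value (heights decrease down a column)
theorem pvFold_eq_colA (l : List Char) (w : Nat) (hw : w < 10) :
    ∀ (n h0 : Nat), h0 + n = 20 → ∀ (a : Int), 0 ≤ a →
    (List.range' h0 n).foldl (fun a h => pvColStep l a (w + h * 10)) a
      = max a (pvColA l w h0) := by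
  intro n
  induction n with
  | zero =>
    intro h0 h20 a ha
    have : ¬ h0 < 20 := by omega
    simp [pvColA, this, List.range']
    omega
  | succ n ih =>
    intro h0 h20 a ha
    have hlt : h0 < 20 := by omega
    have hdiv : (w + h0 * 10) / 10 = h0 := by omega
    have hnext := pvColA_le l w (h0 + 1) (by omega)
    have hnext0 := pvColA_nonneg l w (h0 + 1)
    rw [List.range'_succ, List.foldl_cons]
    have hstep : pvColStep l a (w + h0 * 10)
        = (if pvFilled l (w + h0 * 10) then max a ((20 : Int) - (h0 : Int)) else a) := by
      simp [pvColStep, hdiv]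
    by_cases hf : pvFilled l (w + h0 * 10)
    · have hA : pvColA l w h0 = (20 : Int) - (h0 : Int) := by
        rw [pvColA]; simp [hlt, hf]
      rw [hstep, if_pos hf, ih (h0 + 1) (by omega) _ (by omega), hA]
      push_cast at hnext ⊢
      omega
    · have hA : pvColA l w h0 = pvColA l w (h0 + 1) := by
        rw [pvColA]; simp [hlt, hf]
      rw [hstep, if_neg hf, ih (h0 + 1) (by omega) a ha, hA]

theorem pvAlt_getD (board : String) (w : Nat) (hw : w < 10) :
    (getColHeights_alt board).getD w 0 = pvColA board.toList w 0 := by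
  unfold getColHeights_alt
  rw [pvFoldB_getD board.toList (List.range 200) (List.replicate 10 0) w (by simpa using hw)]
  rw [pvFilter_range w hw, List.foldl_map]
  have : (List.replicate 10 (0 : Int)).getD w 0 = 0 := by
    interval_cases w <;> rfl
  rw [this]
  have h20 : List.range 20 = List.range' 0 20 := by simp [List.range_eq_range']
  rw [h20, pvFold_eq_colA board.toList w hw 20 0 rfl 0 le_rfl]
  have := pvColA_nonneg board.toList w 0
  omega

-- ===== VERDICT (by name: the statement is the Claim_ definition above) =====
theorem getColHeights_spec : Claim_equal_getColHeights := by
  intro board _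
  unfold Spec_getColHeights
  have hlenB : (getColHeights_alt board).length = 10 := by
    simpa [getColHeights_alt] using
      pvFoldB_length board.toList (List.range 200) (List.replicate 10 0)
  have hlenA : (getColHeights board).length = 10 := by simp [getColHeights]
  apply List.ext_getElem (by omega)
  intro w hw1 hw2
  have hw : w < 10 := by omega
  have hB : (getColHeights_alt board)[w] = (getColHeights_alt board).getD w 0 := by
    rw [List.getD_eq_getElem _ _ (by omega)]
  rw [hB, pvAlt_getD board w hw]
  simp [getColHeights]
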